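-- pv_equiv track=rewrite | github.com/Alxit0/leetCode | problems/Medium/59. Spiral Matrix II.py | position_calc
-- ===== SOURCE A (Python) =====
-- def position_calc(n: int):
--     # n, n-1, n-1, n-2, n-2, n-3, n-3
--
--     directions = ((0, 1), (1, 0), (0, -1), (-1, 0))
--     d = 0
--     y, x = 0, -1
--
--     for _ in range(n):
--         y, x = directions[d][0] + y, directions[d][1] + x
--         yield y, x
--
--     while n:
--         n -= 1
--
--         d = (d + 1)%4
--         for _ in range(n):
--             y, x = directions[d][0] + y, directions[d][1] + x
--             yield y, x
--
--         d = (d + 1)%4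
--         for _ in range(n):
--             y, x = directions[d][0] + y, directions[d][1] + x
--             yield y, x
-- ===== SOURCE B (Python) =====
-- def position_calc(n: int):
--     # boundary-shrinking spiral: four walls per layer instead of a direction counter
--     top, bottom, left, right = 0, n - 1, 0, n - 1
--     while top <= bottom and left <= right:
--         for c in range(left, right + 1):
--             yield top, c
--         top += 1
--         for r in range(top, bottom + 1):
--             yield r, right
--         right -= 1
--         if top <= bottom:
--             for c in range(right, left - 1, -1):
--                 yield bottom, c
--             bottom -= 1
--         if left <= right:
--             for r in range(bottom, top - 1, -1):
--                 yield r, left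
--             left += 1
-- ===== Notes on version B (the rewrite author's own statement) =====
-- stated objective: simpler
-- what changed: Replaced the direction-vector generator (an initial run plus a while loop emitting shrinking pairs of runs, stepping a cyclic direction counter into a direction table) by the standard four-boundary spiral: shrink the top/bottom/left/right walls and emit each wall with a plain range, guarded against collapsed layers.
import Mathlib
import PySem

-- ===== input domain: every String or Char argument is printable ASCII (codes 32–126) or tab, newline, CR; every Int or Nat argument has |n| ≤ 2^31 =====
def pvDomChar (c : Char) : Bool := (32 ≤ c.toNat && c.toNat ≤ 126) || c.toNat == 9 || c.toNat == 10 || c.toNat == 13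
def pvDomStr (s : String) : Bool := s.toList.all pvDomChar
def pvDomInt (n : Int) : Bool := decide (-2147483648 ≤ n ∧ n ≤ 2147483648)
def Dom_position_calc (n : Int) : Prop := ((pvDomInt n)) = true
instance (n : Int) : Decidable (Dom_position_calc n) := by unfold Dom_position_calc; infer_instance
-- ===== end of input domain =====

-- B replaces A's direction-table generator by the standard four-boundary spiral loop (objective: simpler).
-- A is a generator; equivalence is about the list of yielded pairs.

-- ===== PORT A =====
-- directions[(d)%4] lookup (d is always kept in 0..3 by the %4 in A)
def pvDirs (d : Nat) : Int × Int :=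
  match d with
  | 0 => (0, 1)
  | 1 => (1, 0)
  | 2 => (0, -1)
  | _ => (-1, 0)

-- 'for _ in range(k): y,x = dy+y, dx+x; yield y,x' — returns (yielded list, final y, final x)
def pvAFor (dy dx y x : Int) : Nat → List (Int × Int) × Int × Int
  | 0 => ([], y, x)
  | k+1 =>
    let y' := dy + y
    let x' := dx + x
    let p := pvAFor dy dx y' x' k
    ((y', x') :: p.1, p.2)

-- the 'while n:' loop (n ≥ 0: fuel = n; each pass runs the two inner for-loops of length n-1)
def pvAWhile : Nat → Nat → Int → Int → List (Int × Int)
  | 0, _, _, _ => []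
  | m+1, d, y, x =>
    let d1 := (d + 1) % 4
    let p1 := pvAFor (pvDirs d1).1 (pvDirs d1).2 y x m
    let d2 := (d1 + 1) % 4
    let p2 := pvAFor (pvDirs d2).1 (pvDirs d2).2 p1.2.1 p1.2.2 m
    p1.1 ++ p2.1 ++ pvAWhile m d2 p2.2.1 p2.2.2

def position_calc (n : Int) : List (Int × Int) :=
  let p0 := pvAFor (pvDirs 0).1 (pvDirs 0).2 0 (-1) n.toNat
  p0.1 ++ pvAWhile n.toNat 0 p0.2.1 p0.2.2

-- ===== PORT B =====
-- four-boundary spiral; terminates because top+right-bottom-left strictly grows each pass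
def pvBLoop : Nat → Int → Int → Int → Int → List (Int × Int)
  | 0, _, _, _, _ => []
  | fuel + 1, top, bottom, left, right =>
    if top ≤ bottom ∧ left ≤ right then
      ((PySem.List.pyRange left (right + 1) 1).map (fun c => (top, c)))
      ++ ((PySem.List.pyRange (top + 1) (bottom + 1) 1).map (fun r => (r, right)))
      ++ (if top + 1 ≤ bottom then
            (PySem.List.pyRange (right - 1) (left - 1) (-1)).map (fun c => (bottom, c)) else [])
      ++ (if left ≤ right - 1 then
            (PySem.List.pyRange (if top + 1 ≤ bottom then bottom - 1 else bottom) (top + 1 - 1) (-1)).map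
              (fun r => (r, left)) else [])
      ++ pvBLoop fuel (top + 1) (if top + 1 ≤ bottom then bottom - 1 else bottom)
           (if left ≤ right - 1 then left + 1 else left) (right - 1)
    else []

-- fuel n.toNat + 1 strictly bounds the loop's iteration count (each pass raises top and lowers right)
def position_calc_alt (n : Int) : List (Int × Int) :=
  pvBLoop (n.toNat + 1) 0 (n - 1) 0 (n - 1)

-- ===== PRECONDITION & SPEC =====
-- Pre_ excludes negative n, on which A's decrementing while-loop never terminates (no value is returned).
def Pre_position_calc (n : Int) : Prop := 0 ≤ n
instance (n : Int) : Decidable (Pre_position_calc n) := by unfold Pre_position_calc; infer_instance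
def pvWitness_position_calc : Int := (3)

def Spec_position_calc (n : Int) (out : List (Int × Int)) : Prop := out = position_calc_alt n
instance (n : Int) (out : List (Int × Int)) : Decidable (Spec_position_calc n out) := by unfold Spec_position_calc; infer_instance

-- ===== CLAIM (what is proved, stated in full; the proofs are below) =====
def Claim_equal_position_calc : Prop := ∀ (n : Int), Dom_position_calc n → Pre_position_calc n → Spec_position_calc n (position_calc n)

-- ===== LEMMAS AND PROOFS =====

-- a straight run of k steps in direction (dy,dx) starting after (y,x)
def pvSeg (dy dx y x : Int) : Nat → List (Int × Int)
  | 0 => []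
  | k+1 => (dy + y, dx + x) :: pvSeg dy dx (dy + y) (dx + x) k

theorem pvAFor_eq (dy dx : Int) : ∀ (k : Nat) (y x : Int),
    pvAFor dy dx y x k = (pvSeg dy dx y x k, y + k * dy, x + k * dx) := by
  intro k
  induction k with
  | zero => intro y x; simp [pvAFor, pvSeg]
  | succ k ih =>
    intro y x
    simp only [pvAFor, pvSeg, ih, Prod.mk.injEq, true_and]
    push_cast
    constructor <;> ring

theorem pvSeg_eq_map (dy dx : Int) : ∀ (k : Nat) (y x : Int),
    pvSeg dy dx y x k
      = (List.range k).map (fun i : Nat => (y + ((i : Int) + 1) * dy, x + ((i : Int) + 1) * dx)) := by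
  intro k
  induction k with
  | zero => intro y x; simp [pvSeg]
  | succ k ih =>
    intro y x
    rw [pvSeg, ih, List.range_succ_eq_map]
    simp only [List.map_cons, List.map_map, List.cons.injEq]
    refine ⟨?_, List.map_congr_left fun i _ => ?_⟩ <;>
      simp only [Function.comp, Prod.mk.injEq] <;>
      refine ⟨by push_cast; ring, by push_cast; ring⟩

-- the four wall ranges of B, as runs
theorem pvRow_right (t a b : Int) :
    (PySem.List.pyRange a b 1).map (fun c => (t, c)) = pvSeg 0 1 t (a - 1) (b - a).toNat := by
  rw [PySem.List.pyRange_one, pvSeg_eq_map, List.map_map]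
  apply List.map_congr_left
  intro i _
  simp only [Function.comp, Prod.mk.injEq]
  refine ⟨by push_cast; ring, by push_cast; ring⟩

theorem pvCol_down (xc a b : Int) :
    (PySem.List.pyRange a b 1).map (fun r => (r, xc)) = pvSeg 1 0 (a - 1) xc (b - a).toNat := by
  rw [PySem.List.pyRange_one, pvSeg_eq_map, List.map_map]
  apply List.map_congr_left
  intro i _
  simp only [Function.comp, Prod.mk.injEq]
  refine ⟨by push_cast; ring, by push_cast; ring⟩

theorem pvRow_left (t a b : Int) :
    (PySem.List.pyRange a b (-1)).map (fun c => (t, c)) = pvSeg 0 (-1) t (a + 1) (a - b).toNat := by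
  rw [PySem.List.pyRange_neg_one, pvSeg_eq_map, List.map_map]
  apply List.map_congr_left
  intro i _
  simp only [Function.comp, Prod.mk.injEq]
  refine ⟨by push_cast; ring, by push_cast; ring⟩

theorem pvCol_up (xc a b : Int) :
    (PySem.List.pyRange a b (-1)).map (fun r => (r, xc)) = pvSeg (-1) 0 (a + 1) xc (a - b).toNat := by
  rw [PySem.List.pyRange_neg_one, pvSeg_eq_map, List.map_map]
  apply List.map_congr_left
  intro i _
  simp only [Function.comp, Prod.mk.injEq]
  refine ⟨by push_cast; ring, by push_cast; ring⟩

-- main invariant: top row + A's remaining while-loop = B's loop on the s×s square at (t,l)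
theorem pvBLoop_nil (f : Nat) (t b l r : Int) (h : ¬ (t ≤ b ∧ l ≤ r)) : pvBLoop f t b l r = [] := by
  cases f with
  | zero => rfl
  | succ f => rw [pvBLoop, if_neg h]

theorem pvMain : ∀ (s : Nat) (f : Nat), s ≤ 2 * f → ∀ (t l : Int),
    pvSeg 0 1 t (l - 1) s ++ pvAWhile s 0 t (l + s - 1) = pvBLoop f t (t + s - 1) l (l + s - 1)
  | 0, f, _, t, l => by
    rw [pvBLoop_nil f _ _ _ _ (by push_cast; omega)]
    simp [pvSeg, pvAWhile]
  | 1, f + 1, _, t, l => by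
    rw [pvBLoop]
    simp only [Nat.cast_one]
    split_ifs <;> try omega
    rw [pvBLoop_nil f _ _ _ _ (by omega)]
    simp only [pvRow_right, pvCol_down, pvAWhile, pvAFor_eq, pvDirs]
    rw [show (l + 1 - 1 + 1 - l).toNat = 1 from by omega,
        show (t + 1 - 1 + 1 - (t + 1)).toNat = 0 from by omega]
    simp [pvSeg]
  | (k+2), f + 1, hf, t, l => by
    have ih := pvMain k f (by omega) (t + 1) (l + 1)
    rw [pvBLoop]
    split_ifs <;> try (exfalso; push_cast at *; omega)
    simp only [pvRow_right, pvCol_down, pvRow_left, pvCol_up, pvAWhile, pvAFor_eq, pvDirs]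
    rw [show (l + ((k + 2 : Nat) : Int) - 1 + 1 - l).toNat = k + 2 from by omega,
        show (t + ((k + 2 : Nat) : Int) - 1 + 1 - (t + 1)).toNat = k + 1 from by omega,
        show (l + ((k + 2 : Nat) : Int) - 1 - 1 - (l - 1)).toNat = k + 1 from by omega,
        show (t + ((k + 2 : Nat) : Int) - 1 - 1 - (t + 1 - 1)).toNat = k from by omega,
        show (((((0 + 1) % 4 + 1) % 4 + 1) % 4 + 1) % 4 : Nat) = 0 from by decide]
    push_cast
    ring_nf
    push_cast at ih
    ring_nf at ih
    rw [add_comm (t : Int) (k : Int)] at ih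
    simp only [List.append_assoc]
    rw [← ih]

-- ===== VERDICT (by name: the statement is the Claim_ definition above) =====
theorem position_calc_spec : Claim_equal_position_calc := by
  intro n _ hpre
  unfold Spec_position_calc position_calc position_calc_alt
  have hs := pvMain n.toNat (n.toNat + 1) (by omega) 0 0
  rw [Int.toNat_of_nonneg hpre] at hs
  simp only [pvAFor_eq, pvDirs] at hs ⊢
  rw [show (0 : Int) - 1 = -1 from by ring, show (0 : Int) + n - 1 = n - 1 from by ring] at hs
  rw [show (0 : Int) + ↑n.toNat * 0 = 0 from by ring,
      show (-1 : Int) + ↑n.toNat * 1 = n - 1 from by rw [Int.toNat_of_nonneg hpre]; ring]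
  exact hs
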